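-- pv_equiv track=rewrite | github.com/ksaa-nlp/balsam-eval | src/metric.py | _match_answers_if_present
-- ===== SOURCE A (Python) =====
-- def _match_answers_if_present(gold_bag, predicted_bag):
--     gold_answer = set()
--     predicted_answer = set()
--     for gold_token in gold_bag:
--         gold_answer.add(gold_token)
--     for predicted_token in predicted_bag:
--         predicted_answer.add(predicted_token)
--
--     if (not gold_answer) or gold_answer.intersection(predicted_answer):
--         return True
--     return False
-- ===== SOURCE B (Python) =====
-- def _match_answers_if_present(gold_bag, predicted_bag):
--     # Sort-merge algorithm: no hash sets; sort both bags and scan with two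
--     # pointers; equal heads => common token; otherwise advance the smaller side.
--     if not gold_bag:
--         return True
--     g = sorted(gold_bag)
--     p = sorted(predicted_bag)
--     i = j = 0
--     while i < len(g) and j < len(p):
--         if g[i] == p[j]:
--             return True
--         if g[i] < p[j]:
--             i += 1
--         else:
--             j += 1
--     return False
-- ===== Notes on version B (the rewrite author's own statement) =====
-- stated objective: alternative
-- what changed: B replaces A's hash-set construction and set intersection with a sort-then-merge scan: both bags are sorted and a two-pointer merge detects the first common token, with an empty gold bag returning True up front.
import Mathlib
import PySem

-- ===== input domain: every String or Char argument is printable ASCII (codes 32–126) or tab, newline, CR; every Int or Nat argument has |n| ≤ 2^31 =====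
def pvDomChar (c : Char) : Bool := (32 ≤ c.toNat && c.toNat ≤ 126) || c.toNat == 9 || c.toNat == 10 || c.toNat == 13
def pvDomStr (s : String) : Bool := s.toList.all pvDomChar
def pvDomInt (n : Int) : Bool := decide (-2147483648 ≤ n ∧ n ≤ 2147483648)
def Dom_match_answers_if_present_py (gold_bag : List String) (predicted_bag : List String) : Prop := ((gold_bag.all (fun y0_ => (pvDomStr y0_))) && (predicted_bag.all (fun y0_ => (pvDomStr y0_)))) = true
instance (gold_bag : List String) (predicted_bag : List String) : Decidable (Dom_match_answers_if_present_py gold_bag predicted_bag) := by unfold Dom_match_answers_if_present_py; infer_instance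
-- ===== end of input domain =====

-- B replaces A's hash-set build + intersection with a sort-then-merge scan (two pointers over both sorted bags); alternative algorithm, same result.


-- ===== PORT A =====
-- literal port of A: build both sets by folding add, then test emptiness / intersection truthiness
def match_answers_if_present_py (gold_bag : List String) (predicted_bag : List String) : Bool :=
  let gold_answer : PySem.Set String := gold_bag.foldl PySem.Set.add PySem.Set.empty
  let predicted_answer : PySem.Set String := predicted_bag.foldl PySem.Set.add PySem.Set.empty
  if gold_answer.isEmpty || !(PySem.Set.inter gold_answer predicted_answer).isEmpty then true
  else false

-- ===== PORT B =====
-- B's two-pointer merge scan over two lists (the while loop of Source B, indices realised as structural heads)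
def pvMergeScan : List String → List String → Bool
  | [], _ => false
  | _ :: _, [] => false
  | a :: as, b :: bs =>
    if a = b then true
    else if a < b then pvMergeScan as (b :: bs)
    else pvMergeScan (a :: as) bs
termination_by g p => g.length + p.length

-- B: empty gold bag → True; else sort both bags and merge-scan for a common token
def match_answers_if_present_py_alt (gold_bag : List String) (predicted_bag : List String) : Bool :=
  if gold_bag.isEmpty then true
  else
    let g := PySem.List.sorted gold_bag (fun x => x) false
    let p := PySem.List.sorted predicted_bag (fun x => x) false
    pvMergeScan g p

-- ===== PRECONDITION & SPEC =====
def Spec_match_answers_if_present_py (gold_bag : List String) (predicted_bag : List String) (out : Bool) : Prop := out = match_answers_if_present_py_alt gold_bag predicted_bag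
instance (gold_bag : List String) (predicted_bag : List String) (out : Bool) : Decidable (Spec_match_answers_if_present_py gold_bag predicted_bag out) := by unfold Spec_match_answers_if_present_py; infer_instance

-- ===== CLAIM (what is proved, stated in full; the proofs are below) =====
def Claim_equal_match_answers_if_present_py : Prop := ∀ (gold_bag : List String) (predicted_bag : List String), Dom_match_answers_if_present_py gold_bag predicted_bag → Spec_match_answers_if_present_py gold_bag predicted_bag (match_answers_if_present_py gold_bag predicted_bag)

-- ===== LEMMAS AND PROOFS =====

-- On lists sorted by ≤, the merge scan finds a common element exactly when one exists.
theorem pvMergeScan_iff (xs ys : List String)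
    (hx : xs.Pairwise (· ≤ ·)) (hy : ys.Pairwise (· ≤ ·)) :
    pvMergeScan xs ys = true ↔ ∃ x, x ∈ xs ∧ x ∈ ys := by
  induction xs, ys using pvMergeScan.induct with
  | case1 ys => simp [pvMergeScan]
  | case2 a as => simp [pvMergeScan]
  | case3 as x bs =>
    simp only [pvMergeScan]
    exact ⟨fun _ => ⟨x, by simp, by simp⟩, fun _ => by simp⟩
  | case4 a as b bs hne hlt ih =>
    rw [List.pairwise_cons] at hx
    have := ih hx.2 hy
    simp only [pvMergeScan, if_neg hne, if_pos hlt, this]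
    constructor
    · rintro ⟨x, hx1, hx2⟩; exact ⟨x, List.mem_cons_of_mem _ hx1, hx2⟩
    · rintro ⟨x, hx1, hx2⟩
      rcases List.mem_cons.mp hx1 with rfl | h
      · -- x = a is in b :: bs, but a < b ≤ every element of bs: contradiction
        exfalso
        rw [List.pairwise_cons] at hy
        rcases List.mem_cons.mp hx2 with rfl | h2
        · exact hne rfl
        · exact absurd (hlt.trans_le (hy.1 _ h2)) (lt_irrefl x)
      · exact ⟨x, h, hx2⟩
  | case5 a as b bs hne hnlt ih =>
    have hba : b < a := lt_of_le_of_ne (not_lt.mp hnlt) (fun h => hne h.symm)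
    rw [List.pairwise_cons] at hy
    have := ih hx hy.2
    simp only [pvMergeScan, if_neg hne, if_neg hnlt, this]
    constructor
    · rintro ⟨x, hx1, hx2⟩; exact ⟨x, hx1, List.mem_cons_of_mem _ hx2⟩
    · rintro ⟨x, hx1, hx2⟩
      rcases List.mem_cons.mp hx2 with rfl | h
      · exfalso
        rw [List.pairwise_cons] at hx
        rcases List.mem_cons.mp hx1 with rfl | h2
        · exact hne rfl
        · exact absurd (hba.trans_le (hx.1 _ h2)) (lt_irrefl x)
      · exact ⟨x, hx1, h⟩

-- A's result characterised: true iff gold_bag is empty or the bags share a token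
theorem portA_iff (g p : List String) :
    match_answers_if_present_py g p = true ↔ g = [] ∨ ∃ x, x ∈ g ∧ x ∈ p := by
  unfold match_answers_if_present_py
  have hg : g.foldl PySem.Set.add PySem.Set.empty = PySem.Set.ofList g :=
    (PySem.Set.ofList_eq_foldl g).symm
  have hp : p.foldl PySem.Set.add PySem.Set.empty = PySem.Set.ofList p := rfl
  simp only [hg, hp]
  by_cases he : (PySem.Set.ofList g : List String).isEmpty = true
  · have : g = [] := by
      rw [List.isEmpty_iff] at he
      rcases g with _ | ⟨x, t⟩
      · rfl
      · exfalso
        have : x ∈ (PySem.Set.ofList (x :: t) : List String) :=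
          (PySem.Set.mem_ofList _ _).mpr (by simp)
        rw [he] at this; cases this
    simp [this]
  · have he' : (PySem.Set.ofList g : List String).isEmpty = false := by simpa using he
    have hgne : g ≠ [] := by
      intro h; subst h; simp [PySem.Set.ofList] at he'
    simp only [he', Bool.false_or]
    constructor
    · intro h
      right
      split_ifs at h with hb
      · have hne : (PySem.Set.inter (PySem.Set.ofList g) (PySem.Set.ofList p) : List String) ≠ [] := by
          simpa [List.isEmpty_iff] using hb
        obtain ⟨x, hx⟩ := List.exists_mem_of_ne_nil _ hne
        rw [PySem.Set.mem_inter] at hx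
        exact ⟨x, (PySem.Set.mem_ofList _ _).mp hx.1, (PySem.Set.mem_ofList _ _).mp hx.2⟩
    · rintro (rfl | ⟨x, hx1, hx2⟩)
      · exact absurd rfl hgne
      · have hx : x ∈ (PySem.Set.inter (PySem.Set.ofList g) (PySem.Set.ofList p) : List String) :=
          (PySem.Set.mem_inter _ _ _).mpr ⟨(PySem.Set.mem_ofList _ _).mpr hx1, (PySem.Set.mem_ofList _ _).mpr hx2⟩
        have : (PySem.Set.inter (PySem.Set.ofList g) (PySem.Set.ofList p) : List String) ≠ [] := by
          intro h; rw [h] at hx; cases hx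
        simp [this]

-- B's result characterised the same way
theorem portB_iff (g p : List String) :
    match_answers_if_present_py_alt g p = true ↔ g = [] ∨ ∃ x, x ∈ g ∧ x ∈ p := by
  unfold match_answers_if_present_py_alt
  by_cases hg : g = []
  · simp [hg]
  · have hge : g.isEmpty = false := by simpa [List.isEmpty_iff] using hg
    simp only [hge, Bool.false_eq_true, if_false]
    rw [pvMergeScan_iff _ _ (PySem.List.sorted_pairwise g (fun x => x) )
        (PySem.List.sorted_pairwise p (fun x => x))]
    constructor
    · rintro ⟨x, hx1, hx2⟩
      exact Or.inr ⟨x, (PySem.List.mem_sorted _ _ _ _).mp hx1, (PySem.List.mem_sorted _ _ _ _).mp hx2⟩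
    · rintro (rfl | ⟨x, hx1, hx2⟩)
      · exact absurd rfl hg
      · exact ⟨x, (PySem.List.mem_sorted _ _ _ _).mpr hx1, (PySem.List.mem_sorted _ _ _ _).mpr hx2⟩

-- ===== VERDICT (by name: the statement is the Claim_ definition above) =====
theorem match_answers_if_present_py_spec : Claim_equal_match_answers_if_present_py := by
  intro g p _
  unfold Spec_match_answers_if_present_py
  have hA := portA_iff g p
  have hB := portB_iff g p
  cases hA' : match_answers_if_present_py g p <;> cases hB' : match_answers_if_present_py_alt g p
  · rfl
  · rw [hA'] at hA; rw [hB'] at hB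
    exact absurd (hB.mp rfl) (by simpa using hA)
  · rw [hA'] at hA; rw [hB'] at hB
    exact absurd (hA.mp rfl) (by simpa using hB)
  · rfl
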